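-- pv_equiv track=rewrite | github.com/YashIndane/codewars-solutions | python/Valid_Spacing.py | valid_spacing
-- ===== SOURCE A (Python) =====
-- from itertools import groupby
--
-- def valid_spacing(s):
--     # write your code here
--     if any([s.startswith(' '), s.endswith(' ')]):
--         return False
--     else:
--         w = groupby(s)
--         for a, b in w:
--             if a == ' ' and len(list(b)) >1:
--                 return False
--
--         return True
-- ===== SOURCE B (Python) =====
-- def valid_spacing(s):
--     return not s.startswith(' ') and not s.endswith(' ') and '  ' not in s
-- ===== Notes on version B (the rewrite author's own statement) =====
-- stated objective: simpler
-- what changed: Replaces the groupby run-length scan with a single boolean expression: a space run of length greater than one exists iff a double-space substring occurs, so B tests substring membership instead of grouping characters and measuring run lengths.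
import Mathlib
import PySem

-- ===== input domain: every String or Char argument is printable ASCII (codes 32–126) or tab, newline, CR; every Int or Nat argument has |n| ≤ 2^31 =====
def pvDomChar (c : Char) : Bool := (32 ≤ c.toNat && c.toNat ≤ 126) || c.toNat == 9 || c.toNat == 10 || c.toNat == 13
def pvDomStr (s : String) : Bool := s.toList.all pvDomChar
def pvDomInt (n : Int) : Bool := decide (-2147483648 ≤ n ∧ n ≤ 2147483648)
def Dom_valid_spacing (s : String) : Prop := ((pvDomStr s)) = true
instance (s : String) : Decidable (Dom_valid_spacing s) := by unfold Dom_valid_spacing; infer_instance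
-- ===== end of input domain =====

-- B replaces A's groupby run-length scan with one boolean expression (substring test); equivalence of return values.

-- ===== PORT A =====
-- itertools.groupby on a list of chars: list of (key, group) runs
def pvGroupby : List Char → List (Char × List Char)
  | [] => []
  | c :: rest =>
    match pvGroupby rest with
    | (k, g) :: gs => if k == c then (c, c :: g) :: gs else (c, [c]) :: (k, g) :: gs
    | [] => [(c, [c])]

-- the 'for a, b in w: if a == ' ' and len(list(b)) > 1: return False / return True' loop
def pvCheckGroups : List (Char × List Char) → Bool
  | [] => true
  | (a, b) :: rest => if a == ' ' && b.length > 1 then false else pvCheckGroups rest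

def valid_spacing (s : String) : Bool :=
  if PySem.Str.startswith s " " || PySem.Str.endswith s " " then false
  else pvCheckGroups (pvGroupby s.toList)

-- ===== PORT B =====
def valid_spacing_alt (s : String) : Bool :=
  !(PySem.Str.startswith s " ") && !(PySem.Str.endswith s " ") && !(PySem.Str.isIn "  " s)

-- ===== PRECONDITION & SPEC =====
def Spec_valid_spacing (s : String) (out : Bool) : Prop := out = valid_spacing_alt s
instance (s : String) (out : Bool) : Decidable (Spec_valid_spacing s out) := by unfold Spec_valid_spacing; infer_instance

-- ===== CLAIM (what is proved, stated in full; the proofs are below) =====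
def Claim_equal_valid_spacing : Prop := ∀ (s : String), Dom_valid_spacing s → Spec_valid_spacing s (valid_spacing s)

-- ===== LEMMAS AND PROOFS =====

theorem pvGroupby_step (c : Char) (rest : List Char) :
    pvGroupby (c :: rest) = (match pvGroupby rest with
      | (k, g) :: gs => if k == c then (c, c :: g) :: gs else (c, [c]) :: (k, g) :: gs
      | [] => [(c, [c])]) := by
  cases rest <;> rfl

-- adjacent-pair scan: true iff no two consecutive spaces
def pvNoDouble : List Char → Bool
  | a :: b :: r => !(a == ' ' && b == ' ') && pvNoDouble (b :: r)
  | _ => true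

-- head run of pvGroupby on a nonempty list starts with the head char
theorem pvGroupby_cons (c : Char) (r : List Char) :
    ∃ g gs, pvGroupby (c :: r) = (c, c :: g) :: gs := by
  induction r generalizing c with
  | nil => exact ⟨[], [], rfl⟩
  | cons d r ih =>
    obtain ⟨g, gs, h⟩ := ih d
    by_cases hdc : d = c
    · exact ⟨d :: g, gs, by rw [pvGroupby_step, h]; simp [hdc]⟩
    · exact ⟨[], (d, d :: g) :: gs, by rw [pvGroupby_step, h]; simp [hdc]⟩

theorem checkGroups_eq_noDouble (l : List Char) :
    pvCheckGroups (pvGroupby l) = pvNoDouble l := by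
  induction l with
  | nil => rfl
  | cons c r ih =>
    cases r with
    | nil => simp [pvGroupby, pvCheckGroups, pvNoDouble]
    | cons d t =>
      obtain ⟨g, gs, h⟩ := pvGroupby_cons d t
      rw [h] at ih
      by_cases hdc : d = c
      · subst hdc
        have : pvGroupby (d :: d :: t) = (d, d :: d :: g) :: gs := by
          rw [pvGroupby_step, h]; simp
        rw [this]
        by_cases hsp : d = ' '
        · simp [pvCheckGroups, pvNoDouble, hsp]
        · simp_all [pvCheckGroups, pvNoDouble, hsp]
      · have : pvGroupby (c :: d :: t) = (c, [c]) :: (d, d :: g) :: gs := by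
          rw [pvGroupby_step, h]; simp [hdc]
        rw [this]
        have hns : ¬(c = ' ' ∧ d = ' ') := by rintro ⟨h1, h2⟩; exact hdc (h2.trans h1.symm)
        simp only [pvCheckGroups, pvNoDouble] at *
        simp only [List.length_cons, List.length_nil]
        by_cases hc : c = ' ' <;> by_cases hd : d = ' ' <;>
          simp_all [pvCheckGroups]

theorem infix_double_iff (l : List Char) :
    ([' ', ' '] <:+: l) ↔ pvNoDouble l = false := by
  induction l with
  | nil => simp [pvNoDouble]
  | cons a r ih =>
    cases r with
    | nil =>
      simp only [pvNoDouble, List.infix_cons_iff]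
      constructor
      · rintro (h | h)
        · have := h.length_le; simp at this
        · simp at h
      · simp
    | cons b t =>
      rw [List.infix_cons_iff]
      simp only [pvNoDouble]
      constructor
      · rintro (h | h)
        · rw [List.cons_prefix_cons] at h
          obtain ⟨h1, h2⟩ := h
          rw [List.cons_prefix_cons] at h2
          simp [h1.symm, h2.1.symm]
        · rw [ih] at h
          simp [h]
      · intro h
        rw [Bool.and_eq_false_iff] at h
        rcases h with h | h
        · simp only [Bool.not_eq_false'] at h
          rw [Bool.and_eq_true] at h
          left
          rw [List.cons_prefix_cons]
          refine ⟨(by simpa using h.1 : a = ' ').symm, ?_⟩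
          rw [List.cons_prefix_cons]
          exact ⟨(by simpa using h.2 : b = ' ').symm, by simp⟩
        · right; rw [ih]; exact h

theorem isIn_double (s : String) :
    PySem.Str.isIn "  " s = !pvNoDouble s.toList := by
  by_cases h : pvNoDouble s.toList
  · rw [h]
    by_contra hc
    simp only [Bool.not_true, Bool.not_eq_false] at hc
    have := (PySem.Str.isIn_iff_infix _ _).mp hc
    rw [show ("  " : String).toList = [' ', ' '] from rfl, infix_double_iff] at this
    simp [h] at this
  · simp only [Bool.not_eq_true] at h
    rw [h]
    simp only [Bool.not_false]
    exact (PySem.Str.isIn_iff_infix _ _).mpr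
      (by rw [show ("  " : String).toList = [' ', ' '] from rfl, infix_double_iff]; exact h)

-- ===== VERDICT (by name: the statement is the Claim_ definition above) =====
theorem valid_spacing_spec : Claim_equal_valid_spacing := by
  intro s _
  unfold Spec_valid_spacing valid_spacing valid_spacing_alt
  rw [checkGroups_eq_noDouble, isIn_double]
  cases hsw : PySem.Str.startswith s " " <;> cases hew : PySem.Str.endswith s " " <;> simp
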